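-- pv_equiv track=rewrite | github.com/hambonesoftware/FluidRAG | fluidrag/backend/core/preprocess/normalize.py | _hex_diff
-- ===== SOURCE A (Python) =====
-- from typing import List, Tuple
--
-- def _hex_diff(text_raw: str, text_norm: str) -> List[str]:
--     """Return a human-readable diff between the raw and normalised text."""
--     diffs: List[str] = []
--     for idx, (raw_ch, norm_ch) in enumerate(zip(text_raw, text_norm)):
--         if raw_ch != norm_ch:
--             diffs.append(f"{ord(norm_ch):04X}->{ord(raw_ch):04X} at pos {idx}")
--     # If normalisation shortened the string (e.g. collapsing whitespace),
--     # record the removed code points as well.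
--     if len(text_raw) > len(text_norm):
--         for idx in range(len(text_norm), len(text_raw)):
--             diffs.append(f"0000->{ord(text_raw[idx]):04X} at pos {idx}")
--     return diffs
-- ===== SOURCE B (Python) =====
-- def _hex_diff(text_raw: str, text_norm: str):
--     """Divide-and-conquer over the position range [0, len(text_raw)): split at the
--     midpoint, recurse on both halves (logarithmic depth), and concatenate; a
--     single-position base case decides removed-tail / mismatch / unchanged."""
--     n = len(text_norm)
--
--     def one(i):
--         raw_ch = text_raw[i]
--         if i >= n:
--             return ["0000->%04X at pos %d" % (ord(raw_ch), i)]
--         norm_ch = text_norm[i]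
--         if raw_ch != norm_ch:
--             return ["%04X->%04X at pos %d" % (ord(norm_ch), ord(raw_ch), i)]
--         return []
--
--     def go(lo, hi):
--         if hi - lo <= 1:
--             return one(lo) if lo < hi else []
--         mid = (lo + hi) // 2
--         return go(lo, mid) + go(mid, hi)
--
--     return go(0, len(text_raw))
-- ===== Notes on version B (the rewrite author's own statement) =====
-- stated objective: alternative
-- what changed: A's two sequential index loops are replaced by a divide-and-conquer recursion over the position range that splits at the midpoint, recurses on both halves and concatenates, with a single-position base case deciding removed-tail / mismatch / unchanged.
import Mathlib
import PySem

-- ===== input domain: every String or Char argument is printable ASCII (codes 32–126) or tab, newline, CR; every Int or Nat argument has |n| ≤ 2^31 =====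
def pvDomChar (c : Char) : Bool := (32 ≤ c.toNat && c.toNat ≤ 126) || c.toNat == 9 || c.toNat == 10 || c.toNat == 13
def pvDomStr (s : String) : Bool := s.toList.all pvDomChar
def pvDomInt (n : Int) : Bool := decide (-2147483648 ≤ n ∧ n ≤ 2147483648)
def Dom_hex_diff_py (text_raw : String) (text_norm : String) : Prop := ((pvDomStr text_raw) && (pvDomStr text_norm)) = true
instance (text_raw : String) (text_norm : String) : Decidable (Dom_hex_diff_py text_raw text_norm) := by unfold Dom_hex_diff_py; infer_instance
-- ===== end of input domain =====

-- B replaces A's two sequential index loops by a divide-and-conquer recursion over the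
-- position range (split at the midpoint, recurse, concatenate); objective: alternative.

-- shared formatting helper (both Pythons produce the same "%04X" format):
-- exact for code points ≤ 0xFFFF, which the ASCII domain guarantees
def pvHexDigit (n : Nat) : Char := if n < 10 then Char.ofNat (48 + n) else Char.ofNat (55 + n)

def pvHex4 (n : Nat) : String :=
  String.ofList [pvHexDigit (n / 4096 % 16), pvHexDigit (n / 256 % 16), pvHexDigit (n / 16 % 16), pvHexDigit (n % 16)]

-- f"{normCp:04X}->{rawCp:04X} at pos {idx}"
def pvEntry (normCp rawCp : Nat) (idx : Int) : String :=
  pvHex4 normCp ++ "->" ++ pvHex4 rawCp ++ " at pos " ++ PySem.Int.toStr idx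

-- ===== PORT A =====
def hex_diff_py (text_raw : String) (text_norm : String) : List String :=
  let rs := text_raw.toList
  let ns := text_norm.toList
  -- first loop: for idx, (raw_ch, norm_ch) in enumerate(zip(text_raw, text_norm))
  let diffs := (PySem.List.enumerate (rs.zip ns)).foldl
    (fun acc p => if p.2.1 ≠ p.2.2 then acc ++ [pvEntry p.2.2.toNat p.2.1.toNat p.1] else acc) []
  -- second loop: removed tail (text_raw[idx] is always in range here)
  if (ns.length : Int) < (rs.length : Int) then
    (PySem.List.pyRange (ns.length : Int) (rs.length : Int) 1).foldl
      (fun acc idx => acc ++ [pvEntry 0 (PySem.List.pyGetD rs idx default).toNat idx]) diffs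
  else diffs

-- ===== PORT B =====
-- base case 'one(i)' of Source B
def pvOne (rs ns : List Char) (i : Int) : List String :=
  let raw_ch := PySem.List.pyGetD rs i default
  if (ns.length : Int) ≤ i then [pvEntry 0 raw_ch.toNat i]
  else
    let norm_ch := PySem.List.pyGetD ns i default
    if raw_ch ≠ norm_ch then [pvEntry norm_ch.toNat raw_ch.toNat i] else []

-- recursive 'go(lo, hi)' of Source B: split the range at the midpoint
def pvGo (rs ns : List Char) (lo hi : Int) : List String :=
  if hi - lo ≤ 1 then (if lo < hi then pvOne rs ns lo else [])
  else
    let mid := PySem.Int.floordiv (lo + hi) 2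
    pvGo rs ns lo mid ++ pvGo rs ns mid hi
termination_by (hi - lo).toNat
decreasing_by
  all_goals
    rw [PySem.Int.floordiv_eq_ediv_of_pos (by omega : (0:Int) < 2)]
    omega

def hex_diff_py_alt (text_raw : String) (text_norm : String) : List String :=
  pvGo text_raw.toList text_norm.toList 0 (text_raw.toList.length : Int)

-- ===== PRECONDITION & SPEC =====
def Spec_hex_diff_py (text_raw : String) (text_norm : String) (out : List String) : Prop := out = hex_diff_py_alt text_raw text_norm
instance (text_raw : String) (text_norm : String) (out : List String) : Decidable (Spec_hex_diff_py text_raw text_norm out) := by unfold Spec_hex_diff_py; infer_instance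

-- ===== CLAIM (what is proved, stated in full; the proofs are below) =====
def Claim_equal_hex_diff_py : Prop := ∀ (text_raw : String) (text_norm : String), Dom_hex_diff_py text_raw text_norm → Spec_hex_diff_py text_raw text_norm (hex_diff_py text_raw text_norm)

-- ===== LEMMAS AND PROOFS =====

-- flatMap of a pointwise conditional singleton is filter-then-map
theorem pv_flatMap_ite {α β : Type} (l : List α) (f : α → List β) (p : α → Prop)
    [DecidablePred p] (g : α → β)
    (h : ∀ x ∈ l, f x = if p x then [g x] else []) :
    l.flatMap f = (l.filter (fun x => decide (p x))).map g := by
  induction l with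
  | nil => simp
  | cons a t ih =>
    have ha := h a (by simp)
    simp only [List.flatMap_cons, List.filter_cons, ha]
    by_cases hp : p a
    · simp [hp, ih (fun x hx => h x (by simp [hx]))]
    · simp [hp, ih (fun x hx => h x (by simp [hx]))]

-- flatMap of a pointwise singleton is map
theorem pv_flatMap_singleton {α β : Type} (l : List α) (f : α → List β) (g : α → β)
    (h : ∀ x ∈ l, f x = [g x]) :
    l.flatMap f = l.map g := by
  induction l with
  | nil => simp
  | cons a t ih =>
    simp only [List.flatMap_cons, List.map_cons, h a (by simp)]
    simp [ih (fun x hx => h x (by simp [hx]))]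

-- B's recursion computes the flatMap of the base case over the range
theorem pvGo_eq_flatMap (rs ns : List Char) (lo hi : Int) :
    pvGo rs ns lo hi = (PySem.List.pyRange lo hi 1).flatMap (pvOne rs ns) := by
  induction lo, hi using pvGo.induct with
  | case1 lo hi h hlt =>
    have he : hi = lo + 1 := by omega
    subst he
    rw [pvGo, PySem.List.pyRange_one_singleton]
    simp [hlt]
  | case2 lo hi h hlt =>
    rw [pvGo, PySem.List.pyRange_one_eq_nil (by omega)]
    simp [h, hlt]
  | case3 lo hi h mid ih1 ih2 =>
    have hb := PySem.Int.floordiv_two_mid_bounds (show lo ≤ hi by omega)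
    rw [pvGo]
    simp only [if_neg h]
    rw [PySem.List.pyRange_one_append lo (PySem.Int.floordiv (lo + hi) 2) hi hb.1 hb.2,
        List.flatMap_append, ih1, ih2]

-- A's first loop equals the flatMap of the base case over the common prefix
theorem pv_prefix (rs ns : List Char) :
    (PySem.List.enumerate (rs.zip ns)).foldl
      (fun acc p => if p.2.1 ≠ p.2.2 then acc ++ [pvEntry p.2.2.toNat p.2.1.toNat p.1] else acc) []
    = (PySem.List.pyRange 0 ((min rs.length ns.length : Nat) : Int) 1).flatMap (pvOne rs ns) := by
  rw [PySem.List.enumerate_eq_map_pyRange (rs.zip ns) (default, default),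
      PySem.List.foldl_append_ite]
  simp only [List.nil_append, List.filter_map, List.map_map, PySem.List.len, List.length_zip]
  rw [pv_flatMap_ite _ (pvOne rs ns)
        (fun j => PySem.List.pyGetD rs j default ≠ PySem.List.pyGetD ns j default)
        (fun j => pvEntry (PySem.List.pyGetD ns j default).toNat (PySem.List.pyGetD rs j default).toNat j) ?_]
  · rw [List.filter_congr (q := fun j => decide (PySem.List.pyGetD rs j default ≠ PySem.List.pyGetD ns j default)) ?_]
    · apply List.map_congr_left
      intro j hj
      have hb := PySem.List.mem_pyRange_one.mp (List.mem_filter.mp hj).1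
      simp only [Function.comp]
      rw [PySem.List.pyGetD_eq_getElem (rs.zip ns) _ hb.1 (by rw [List.length_zip]; omega),
          PySem.List.pyGetD_eq_getElem rs _ hb.1 (by omega),
          PySem.List.pyGetD_eq_getElem ns _ hb.1 (by omega)]
      simp [List.getElem_zip]
    · intro j hj
      have hb := PySem.List.mem_pyRange_one.mp hj
      simp only [Function.comp]
      simp only [PySem.List.pyGetD_eq_getElem (rs.zip ns) _ hb.1 (by rw [List.length_zip]; omega),
          PySem.List.pyGetD_eq_getElem rs _ hb.1 (by omega),
          PySem.List.pyGetD_eq_getElem ns _ hb.1 (by omega)]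
      simp [List.getElem_zip]
  · intro j hj
    have hb := PySem.List.mem_pyRange_one.mp hj
    have hn : ¬ ((ns.length : Int) ≤ j) := by omega
    simp only [pvOne, if_neg hn]

-- A equals the same flatMap normal form as B
theorem hex_diff_py_eq_flatMap (rs ns : List Char) :
    (let diffs := (PySem.List.enumerate (rs.zip ns)).foldl
        (fun acc p => if p.2.1 ≠ p.2.2 then acc ++ [pvEntry p.2.2.toNat p.2.1.toNat p.1] else acc) [];
     if (ns.length : Int) < (rs.length : Int) then
       (PySem.List.pyRange (ns.length : Int) (rs.length : Int) 1).foldl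
         (fun acc idx => acc ++ [pvEntry 0 (PySem.List.pyGetD rs idx default).toNat idx]) diffs
     else diffs)
    = (PySem.List.pyRange 0 (rs.length : Int) 1).flatMap (pvOne rs ns) := by
  simp only [pv_prefix]
  by_cases h : (ns.length : Int) < (rs.length : Int)
  · rw [if_pos h, PySem.List.foldl_append_singleton_eq_map]
    have hmin : ((min rs.length ns.length : Nat) : Int) = (ns.length : Int) := by
      push_cast; omega
    rw [hmin]
    conv_rhs => rw [PySem.List.pyRange_one_append 0 (ns.length : Int) (rs.length : Int)
      (by positivity) (by omega)]
    rw [List.flatMap_append]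
    congr 1
    rw [pv_flatMap_singleton _ (pvOne rs ns)
          (fun j => pvEntry 0 (PySem.List.pyGetD rs j default).toNat j) ?_]
    intro j hj
    have hb := PySem.List.mem_pyRange_one.mp hj
    simp [pvOne, hb.1]
  · rw [if_neg h]
    have hmin : ((min rs.length ns.length : Nat) : Int) = (rs.length : Int) := by
      push_cast; omega
    rw [hmin]

theorem hex_diff_py_eq_alt (text_raw text_norm : String) :
    hex_diff_py text_raw text_norm = hex_diff_py_alt text_raw text_norm := by
  unfold hex_diff_py hex_diff_py_alt
  rw [pvGo_eq_flatMap]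
  exact hex_diff_py_eq_flatMap text_raw.toList text_norm.toList

-- ===== VERDICT (by name: the statement is the Claim_ definition above) =====
theorem hex_diff_py_spec : Claim_equal_hex_diff_py := by
  intro r n _
  unfold Spec_hex_diff_py
  exact hex_diff_py_eq_alt r n
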